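-- pv_equiv track=rewrite | github.com/MickBarbi/CS115 | scrabble/hw2.py | check_letters
-- ===== SOURCE A (Python) =====
-- def ind(e, L):
--     """
--     takes as input a character and a string/list
--
--     return the index at which e is first found in L(string or list)
--     """
--     if L == "" or L == []:
--         return 0
--     elif L[0] == e:
--         return 0
--     return 1 + ind(e, L[1::])
--
-- def check_letters(word, Rack):
--     """
--     takes as input a string and a Rack which is a list of lower-case leters
--
--     returns true if the string can be made using the letters in the rack and false if it cannot
--     """
--     if word == "":
--         return True
--     else:
--         if word[0] in Rack:
--             x = ind(word[0], Rack)
--             return check_letters(word[1:], Rack[0:x] + Rack[x+1:])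
--         return False
-- ===== SOURCE B (Python) =====
-- def check_letters(word, Rack):
--     rack = list(Rack)
--     for ch in word:
--         if ch in rack:
--             rack.remove(ch)
--         else:
--             return False
--     return True
-- ===== Notes on version B (the rewrite author's own statement) =====
-- stated objective: idiomatic
-- what changed: Replaced the double recursion (recursive descent over the word plus a recursive index-hunting helper and slice-based reconstruction of the rack) by a single iterative loop over the word that maintains one mutable rack copy and uses list.remove to delete the first occurrence.
import Mathlib
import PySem

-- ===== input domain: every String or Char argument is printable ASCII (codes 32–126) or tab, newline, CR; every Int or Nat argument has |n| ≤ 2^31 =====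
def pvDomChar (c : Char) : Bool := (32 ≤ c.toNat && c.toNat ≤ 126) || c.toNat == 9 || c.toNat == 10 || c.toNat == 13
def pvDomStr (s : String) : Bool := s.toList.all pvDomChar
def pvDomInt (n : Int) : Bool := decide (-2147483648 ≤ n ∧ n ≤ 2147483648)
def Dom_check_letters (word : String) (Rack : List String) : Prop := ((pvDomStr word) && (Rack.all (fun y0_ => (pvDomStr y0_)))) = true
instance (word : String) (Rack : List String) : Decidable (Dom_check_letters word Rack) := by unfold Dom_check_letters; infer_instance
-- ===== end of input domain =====

-- B replaces A's word-recursion + recursive index helper + slice reconstruction by one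
-- iterative loop over the word maintaining a single rack copy with first-occurrence removal (idiomatic).
-- ===== PORT A =====
-- recursive helper ind(e, L): index of first occurrence of e in L (list branch)
def pv_ind (e : String) (L : List String) : Nat :=
  match L with
  | [] => 0
  | x :: xs => if x == e then 0 else 1 + pv_ind e xs

-- recursion over the word's characters (word[0], word[1:]); Rack[0:x] + Rack[x+1:] is
-- take x ++ drop (x+1), exact here since 0 ≤ x (PySem.List.slice on natural bounds).
def check_letters_go (chars : List Char) (Rack : List String) : Bool :=
  match chars with
  | [] => true
  | c :: rest =>
    let s := String.singleton c
    if Rack.contains s then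
      let x := pv_ind s Rack
      check_letters_go rest (Rack.take x ++ Rack.drop (x + 1))
    else false

def check_letters (word : String) (Rack : List String) : Bool :=
  check_letters_go word.toList Rack

-- ===== PORT B =====
-- loop `for ch in word` carrying the mutable rack copy; rack.remove(ch) = PySem.List.remove?
def check_letters_alt_go (chars : List Char) (rack : List String) : Bool :=
  match chars with
  | [] => true
  | c :: rest =>
    match PySem.List.remove? rack (String.singleton c) with
    | some rack' => check_letters_alt_go rest rack'
    | none => false

def check_letters_alt (word : String) (Rack : List String) : Bool :=
  check_letters_alt_go word.toList Rack

-- ===== PRECONDITION & SPEC =====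
def Spec_check_letters (word : String) (Rack : List String) (out : Bool) : Prop := out = check_letters_alt word Rack
instance (word : String) (Rack : List String) (out : Bool) : Decidable (Spec_check_letters word Rack out) := by unfold Spec_check_letters; infer_instance

-- ===== CLAIM (what is proved, stated in full; the proofs are below) =====
def Claim_equal_check_letters : Prop := ∀ (word : String) (Rack : List String), Dom_check_letters word Rack → Spec_check_letters word Rack (check_letters word Rack)

-- ===== LEMMAS AND PROOFS =====

-- ===== VERDICT (by name: the statement is the Claim_ definition above) =====
-- A's rack update take x ++ drop (x+1) at x = index of first occurrence is exactly
-- what remove? produces when the element is present.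
theorem remove?_eq_ind (s : String) (L : List String) (h : L.contains s = true) :
    PySem.List.remove? L s = some (L.take (pv_ind s L) ++ L.drop (pv_ind s L + 1)) := by
  induction L with
  | nil => simp at h
  | cons x xs ih =>
    by_cases hx : x = s
    · subst hx
      simp [PySem.List.remove?_cons_self, pv_ind]
    · have hxs : xs.contains s = true := by
        simp [List.contains_cons] at h
        rcases h with h | h
        · exact absurd h.symm hx
        · simpa using h
      rw [PySem.List.remove?_cons_of_ne xs hx, ih hxs]
      have : (x == s) = false := by simp [hx]
      simp [pv_ind, this, Nat.add_comm 1 (pv_ind s xs), List.take_succ_cons]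

theorem go_eq (chars : List Char) : ∀ rack, check_letters_go chars rack = check_letters_alt_go chars rack := by
  induction chars with
  | nil => intro rack; rfl
  | cons c rest ih =>
    intro rack
    by_cases h : rack.contains (String.singleton c) = true
    · simp only [check_letters_go, check_letters_alt_go, remove?_eq_ind _ _ h, if_pos h]
      exact ih _
    · have hn : PySem.List.remove? rack (String.singleton c) = none := by
        rw [PySem.List.remove?_eq_none_iff]
        simpa using h
      simp only [check_letters_go, check_letters_alt_go, hn, if_neg h]

theorem check_letters_spec : Claim_equal_check_letters := by
  intro word Rack _
  unfold Spec_check_letters check_letters check_letters_alt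
  exact go_eq _ _
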